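-- pv_equiv track=rewrite | github.com/I-AM-IRONMAN-10/Python | practical test.py | generate_all_pins
-- ===== SOURCE A (Python) =====
-- def generate_repeating_pins(pin_length):
--
--     return {str(digit) * pin_length for digit in range(10)}
--
-- def generate_sequential_pins(pin_length):
--
--     sequential_pins = set()
--     digits = "0123456789"
--
--     for i in range(10 - pin_length + 1):
--         sequential_pins.add(digits[i:i + pin_length])
--
--     for i in range(10 - pin_length + 1):
--         sequential_pins.add(digits[::-1][i:i + pin_length])
--
--     return sequential_pins
--
-- def generate_all_pins(pin_length, date_pins_2part, date_pins_1part, phone_pins):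
--
--     limit = 10**pin_length
--     all_pins = {str(i).zfill(pin_length) for i in range(limit)}
--
--     date_pins = set(date_pins_2part.keys()) | set(date_pins_1part.keys())
--     phone_pins_set = set(phone_pins)
--
--     unique_pins = sorted(all_pins - date_pins - phone_pins_set)
--     repeating_pins = generate_repeating_pins(pin_length)
--     sequential_pins = generate_sequential_pins(pin_length)
--
--     priority_pins = sorted((repeating_pins | sequential_pins) - date_pins - phone_pins_set)
--     final_pins = sorted(set(unique_pins) - repeating_pins - sequential_pins)
--
--     return priority_pins, final_pins
-- ===== SOURCE B (Python) =====
-- def generate_all_pins(pin_length, date_pins_2part, date_pins_1part, phone_pins):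
--     excluded = set(date_pins_2part) | set(date_pins_1part) | set(phone_pins)
--     asc, desc = "0123456789", "9876543210"
--     priority, final = [], []
--     for i in range(10 ** pin_length):
--         pin = str(i).zfill(pin_length)
--         if pin in excluded:
--             continue
--         if len(set(pin)) == 1 or pin in asc or pin in desc:
--             priority.append(pin)
--         else:
--             final.append(pin)
--     return priority, final
-- ===== Notes on version B (the rewrite author's own statement) =====
-- stated objective: simpler
-- what changed: B replaces A's set-comprehension/set-difference algebra and three sorted() calls by a single ascending pass over range(10**pin_length) that classifies each pin once (skip if excluded, priority if repeating/sequential by a direct test, else final), relying on fixed-width pins being generated in lexicographic order so no sorting is needed.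
-- outside the precondition, e.g. on generate_all_pins(0, {}, {}, []): A returns ([''], ['0']), B returns (['0'], [])
import Mathlib
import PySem

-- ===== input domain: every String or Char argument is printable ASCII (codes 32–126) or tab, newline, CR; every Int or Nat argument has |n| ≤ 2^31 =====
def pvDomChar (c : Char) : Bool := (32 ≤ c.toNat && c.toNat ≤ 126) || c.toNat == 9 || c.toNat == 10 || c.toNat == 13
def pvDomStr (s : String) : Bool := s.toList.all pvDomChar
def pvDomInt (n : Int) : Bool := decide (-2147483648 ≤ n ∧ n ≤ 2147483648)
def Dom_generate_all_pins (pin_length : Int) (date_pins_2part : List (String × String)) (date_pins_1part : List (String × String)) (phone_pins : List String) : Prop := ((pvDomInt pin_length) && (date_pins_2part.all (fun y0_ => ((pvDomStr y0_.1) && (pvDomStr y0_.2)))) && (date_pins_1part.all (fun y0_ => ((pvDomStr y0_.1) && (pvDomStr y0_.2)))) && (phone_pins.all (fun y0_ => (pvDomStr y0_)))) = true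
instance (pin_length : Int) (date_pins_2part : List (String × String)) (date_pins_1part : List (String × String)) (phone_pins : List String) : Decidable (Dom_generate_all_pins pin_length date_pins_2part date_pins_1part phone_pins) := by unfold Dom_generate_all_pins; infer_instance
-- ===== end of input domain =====

-- B replaces A's set algebra and three sorts by one ascending pass that classifies each pin
-- directly (fixed-width pins appear in lexicographic order, so no sorting is needed): simpler.

-- ===== PORT A =====
-- str(i).zfill(pin_length): exact Python zfill for strings with no '+'/'-' prefix; every use
-- here applies it to str(i) with i ≥ 0, which never carries a sign.
def pyZfill (s : String) (w : Int) : String :=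
  String.ofList (List.replicate (w.toNat - s.toList.length) '0' ++ s.toList)

def generate_repeating_pins (pin_length : Int) : PySem.Set String :=
  PySem.Set.ofList ((PySem.List.pyRange 0 10).map
    (fun d => String.ofList (PySem.List.pyRepeat (PySem.Int.toChars d) pin_length)))

def generate_sequential_pins (pin_length : Int) : PySem.Set String :=
  let digits : String := "0123456789"
  -- first loop: digits[i:i+pin_length]
  let s1 := (PySem.List.pyRange 0 (10 - pin_length + 1)).foldl
      (fun s i => PySem.Set.add s (PySem.Str.slice digits (some i) (some (i + pin_length))))
      PySem.Set.empty
  -- second loop over digits[::-1]; digits[::-1] = String.ofList digits.toList.reverse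
  -- (PySem.Str.slice?_none_none_neg_one)
  (PySem.List.pyRange 0 (10 - pin_length + 1)).foldl
      (fun s i => PySem.Set.add s
        (PySem.Str.slice (String.ofList digits.toList.reverse) (some i) (some (i + pin_length))))
      s1

def generate_all_pins (pin_length : Int) (date_pins_2part : List (String × String)) (date_pins_1part : List (String × String)) (phone_pins : List String) : List String × List String :=
  -- 10**pin_length: exact for pin_length ≥ 0 (a negative exponent makes Python's range raise: outside Pre_)
  let limit : Int := (10 : Int) ^ pin_length.toNat
  let all_pins : PySem.Set String :=
    PySem.Set.ofList ((PySem.List.pyRange 0 limit).map (fun i => pyZfill (PySem.Int.toStr i) pin_length))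
  let date_pins : PySem.Set String :=
    PySem.Set.union (PySem.Set.ofList (PySem.Dict.keys ⟨date_pins_2part⟩))
      (PySem.Set.ofList (PySem.Dict.keys ⟨date_pins_1part⟩))
  let phone_pins_set : PySem.Set String := PySem.Set.ofList phone_pins
  let unique_pins :=
    PySem.List.sorted (PySem.Set.diff (PySem.Set.diff all_pins date_pins) phone_pins_set) (fun x => x)
  let repeating_pins := generate_repeating_pins pin_length
  let sequential_pins := generate_sequential_pins pin_length
  let priority_pins :=
    PySem.List.sorted
      (PySem.Set.diff (PySem.Set.diff (PySem.Set.union repeating_pins sequential_pins) date_pins)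
        phone_pins_set) (fun x => x)
  let final_pins :=
    PySem.List.sorted
      (PySem.Set.diff (PySem.Set.diff (PySem.Set.ofList unique_pins) repeating_pins) sequential_pins)
      (fun x => x)
  (priority_pins, final_pins)

-- ===== PORT B =====
-- len(set(pin)) == 1 or pin in "0123456789" or pin in "9876543210"
def pinIsSpecial (pin : String) : Bool :=
  (PySem.Set.len (PySem.Set.ofList pin.toList) == 1)
    || PySem.Str.isIn pin "0123456789" || PySem.Str.isIn pin "9876543210"

def generate_all_pins_alt (pin_length : Int) (date_pins_2part : List (String × String)) (date_pins_1part : List (String × String)) (phone_pins : List String) : List String × List String :=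
  let excluded : PySem.Set String :=
    PySem.Set.union
      (PySem.Set.union (PySem.Set.ofList (PySem.Dict.keys ⟨date_pins_2part⟩))
        (PySem.Set.ofList (PySem.Dict.keys ⟨date_pins_1part⟩)))
      (PySem.Set.ofList phone_pins)
  (PySem.List.pyRange 0 ((10 : Int) ^ pin_length.toNat)).foldl
    (fun acc i =>
      let pin := pyZfill (PySem.Int.toStr i) pin_length
      if PySem.Set.contains excluded pin then acc
      else if pinIsSpecial pin then (acc.1 ++ [pin], acc.2)
      else (acc.1, acc.2 ++ [pin]))
    ([], [])

-- ===== PRECONDITION & SPEC =====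
-- Pre_ excludes non-positive pin_length: for negative pin_length A raises TypeError
-- (10**pin_length is a float there, and range rejects it), and at pin_length = 0 zfill's
-- refusal to produce a width-0 string makes A's outputs ('' as the only priority pin and
-- '0' as the only remaining pin) accidental artefacts of the implementation, as is B's value there.
def Pre_generate_all_pins (pin_length : Int) (date_pins_2part : List (String × String)) (date_pins_1part : List (String × String)) (phone_pins : List String) : Prop := 1 ≤ pin_length
instance (pin_length : Int) (date_pins_2part : List (String × String)) (date_pins_1part : List (String × String)) (phone_pins : List String) : Decidable (Pre_generate_all_pins pin_length date_pins_2part date_pins_1part phone_pins) := by unfold Pre_generate_all_pins; infer_instance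

def pvWitness_generate_all_pins : Int × (List (String × String)) × (List (String × String)) × List String := (2, [("11", "x")], [], ["23"])

def Spec_generate_all_pins (pin_length : Int) (date_pins_2part : List (String × String)) (date_pins_1part : List (String × String)) (phone_pins : List String) (out : List String × List String) : Prop := out = generate_all_pins_alt pin_length date_pins_2part date_pins_1part phone_pins
instance (pin_length : Int) (date_pins_2part : List (String × String)) (date_pins_1part : List (String × String)) (phone_pins : List String) (out : List String × List String) : Decidable (Spec_generate_all_pins pin_length date_pins_2part date_pins_1part phone_pins out) := by unfold Spec_generate_all_pins; infer_instance

-- ===== CLAIM (what is proved, stated in full; the proofs are below) =====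
def Claim_equal_generate_all_pins : Prop := ∀ (pin_length : Int) (date_pins_2part : List (String × String)) (date_pins_1part : List (String × String)) (phone_pins : List String), Dom_generate_all_pins pin_length date_pins_2part date_pins_1part phone_pins → Pre_generate_all_pins pin_length date_pins_2part date_pins_1part phone_pins → Spec_generate_all_pins pin_length date_pins_2part date_pins_1part phone_pins (generate_all_pins pin_length date_pins_2part date_pins_1part phone_pins)

-- ===== LEMMAS AND PROOFS =====

def natChars (n : Nat) : List Char :=
  if h : n < 10 then [Nat.digitChar n]
  else natChars (n / 10) ++ [Nat.digitChar (n % 10)]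
  decreasing_by exact Nat.div_lt_self (by omega) (by omega)

theorem natChars_lt {n : Nat} (h : n < 10) : natChars n = [Nat.digitChar n] := by
  rw [natChars]; simp [h]

theorem natChars_ge {n : Nat} (h : ¬ n < 10) :
    natChars n = natChars (n / 10) ++ [Nat.digitChar (n % 10)] := by
  rw [natChars]; simp [h]

theorem toDigitsCore_eq_natChars (f : Nat) : ∀ (n : Nat) (acc : List Char), n < f →
    Nat.toDigitsCore 10 f n acc = natChars n ++ acc := by
  induction f with
  | zero => intro n acc h; omega
  | succ f ih =>
    intro n acc h
    rw [Nat.toDigitsCore]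
    by_cases h10 : n < 10
    · have : n / 10 = 0 := Nat.div_eq_of_lt h10
      simp [this, natChars_lt h10, Nat.mod_eq_of_lt h10]
    · have hne : n / 10 ≠ 0 := by omega
      simp only [hne, if_false]
      rw [ih (n / 10) _ (by omega)]
      rw [natChars_ge h10]
      simp

theorem toChars_natCast (k : Nat) : PySem.Int.toChars (k : Int) = natChars k := by
  simp [PySem.Int.toChars, Nat.toDigits]
  rw [toDigitsCore_eq_natChars (k+1) k [] (by omega)]
  simp

theorem natChars_ne_nil (n : Nat) : natChars n ≠ [] := by
  by_cases h : n < 10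
  · simp [natChars_lt h]
  · simp [natChars_ge h]

theorem len_natChars_le (k : Nat) : ∀ n, 1 ≤ k → n < 10 ^ k → (natChars n).length ≤ k := by
  induction k with
  | zero => omega
  | succ k ih =>
    intro n _ hn
    by_cases h : n < 10
    · simp [natChars_lt h]
    · have hk : 1 ≤ k := by
        by_contra hk0
        have : k = 0 := by omega
        subst this; simp at hn; omega
      rw [natChars_ge h]
      have : n / 10 < 10 ^ k := by
        rw [Nat.div_lt_iff_lt_mul (by omega)]
        calc n < 10 ^ (k+1) := hn
        _ = 10 ^ k * 10 := by ring
      simpa using ih (n / 10) hk this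

theorem le_len_natChars (k : Nat) : ∀ n, 10 ^ k ≤ n → k + 1 ≤ (natChars n).length := by
  induction k with
  | zero =>
    intro n _
    have := natChars_ne_nil n
    have := List.length_pos_iff.mpr this
    omega
  | succ k ih =>
    intro n hn
    have h10 : ¬ n < 10 := by
      have : (10:Nat) ≤ 10 ^ (k+1) := by
        calc (10:Nat) = 10 ^ 1 := by ring
        _ ≤ 10 ^ (k+1) := Nat.pow_le_pow_right (by omega) (by omega)
      omega
    rw [natChars_ge h10]
    have : 10 ^ k ≤ n / 10 := by
      rw [Nat.le_div_iff_mul_le (by omega)]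
      calc 10 ^ k * 10 = 10 ^ (k+1) := by ring
      _ ≤ n := hn
    have := ih (n / 10) this
    simp; omega

theorem natChars_digits (n : Nat) : ∀ c ∈ natChars n, ∃ d, d < 10 ∧ c = Nat.digitChar d := by
  induction n using Nat.strong_induction_on with
  | _ n ih =>
    by_cases h : n < 10
    · rw [natChars_lt h]; intro c hc; simp at hc; exact ⟨n, h, hc⟩
    · rw [natChars_ge h]
      intro c hc
      rcases List.mem_append.mp hc with hc | hc
      · exact ih (n / 10) (Nat.div_lt_self (by omega) (by omega)) c hc
      · simp at hc; exact ⟨n % 10, Nat.mod_lt _ (by omega), hc⟩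

def pinZ (w n : Nat) : List Char :=
  List.replicate (w - (natChars n).length) '0' ++ natChars n

theorem length_pinZ {w n : Nat} (hw : 1 ≤ w) (h : n < 10 ^ w) : (pinZ w n).length = w := by
  have := len_natChars_le w n hw h
  simp [pinZ]; omega

theorem pinZ_digits (w n : Nat) : ∀ c ∈ pinZ w n, ∃ d, d < 10 ∧ c = Nat.digitChar d := by
  intro c hc
  rcases List.mem_append.mp hc with hc | hc
  · rw [List.eq_of_mem_replicate hc]; exact ⟨0, by omega, rfl⟩
  · exact natChars_digits n c hc

theorem pinZ_append (w : Nat) (hw : 1 ≤ w) (r : Nat) :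
    pinZ (w + 1) r = pinZ w (r / 10) ++ [Nat.digitChar (r % 10)] := by
  by_cases h : r < 10
  · have h0 : r / 10 = 0 := Nat.div_eq_of_lt h
    rw [pinZ, pinZ, natChars_lt h, h0, natChars_lt (by omega : (0:Nat) < 10),
      Nat.mod_eq_of_lt h]
    show List.replicate (w + 1 - 1) '0' ++ [Nat.digitChar r]
      = (List.replicate (w - 1) '0' ++ [Nat.digitChar 0]) ++ [Nat.digitChar r]
    have : Nat.digitChar 0 = '0' := rfl
    rw [this, ← List.replicate_succ' (n := w - 1)]
    have : w - 1 + 1 = w + 1 - 1 := by omega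
    rw [this]
  · rw [pinZ, pinZ, natChars_ge h]
    simp only [List.length_append, List.length_singleton, List.append_assoc]
    congr 2
    omega

theorem pinZ_step (w : Nat) (hw : 1 ≤ w) : ∀ n, n < 10 ^ (w + 1) →
    pinZ (w + 1) n = Nat.digitChar (n / 10 ^ w) :: pinZ w (n % 10 ^ w) := by
  induction w, hw using Nat.le_induction with
  | base =>
    intro n hn
    by_cases h : n < 10
    · have h0 : n / 10 ^ 1 = 0 := Nat.div_eq_of_lt (by simpa using h)
      have h1 : n % 10 ^ 1 = n := Nat.mod_eq_of_lt (by simpa using h)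
      rw [h0, h1, pinZ, pinZ, natChars_lt h]
      simp [List.replicate_succ]
      rfl
    · have hlt : n / 10 < 10 := by
        rw [Nat.div_lt_iff_lt_mul (by omega)]; simpa [pow_succ] using hn
      simp only [pow_one]
      rw [pinZ, pinZ, natChars_ge h, natChars_lt hlt]
      have hm : natChars (n % 10) = [Nat.digitChar (n % 10)] :=
        natChars_lt (Nat.mod_lt n (by omega))
      rw [hm]
      simp
  | succ w hw1 ih =>
    intro n hn
    by_cases h : n < 10 ^ (w + 1)
    · have h0 : n / 10 ^ (w + 1) = 0 := Nat.div_eq_of_lt h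
      have h1 : n % 10 ^ (w + 1) = n := Nat.mod_eq_of_lt h
      rw [h0, h1]
      have hlen : (natChars n).length ≤ w + 1 := len_natChars_le (w+1) n (by omega) h
      rw [pinZ, pinZ]
      have : w + 1 + 1 - (natChars n).length = (w + 1 - (natChars n).length) + 1 := by omega
      rw [this, List.replicate_succ]
      rfl
    · rw [not_lt] at h
      have h10 : ¬ n < 10 := by
        have : (10:Nat) ≤ 10 ^ (w+1) := by
          calc (10:Nat) = 10 ^ 1 := by ring
          _ ≤ 10 ^ (w+1) := Nat.pow_le_pow_right (by omega) (by omega)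
        omega
      have hlen : (natChars n).length = w + 2 := by
        have := len_natChars_le (w+2) n (by omega) hn
        have := le_len_natChars (w+1) n h
        omega
      have hd10 : n / 10 < 10 ^ (w + 1) := by
        rw [Nat.div_lt_iff_lt_mul (by omega)]
        calc n < 10 ^ (w+2) := hn
        _ = 10 ^ (w+1) * 10 := by ring
      have hd10' : 10 ^ w ≤ n / 10 := by
        rw [Nat.le_div_iff_mul_le (by omega)]
        calc 10 ^ w * 10 = 10 ^ (w+1) := by ring
        _ ≤ n := h
      have hlen10 : (natChars (n / 10)).length = w + 1 := by
        have := len_natChars_le (w+1) (n/10) (by omega) hd10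
        have := le_len_natChars w (n/10) hd10'
        omega
      have e1 : pinZ (w + 1 + 1) n = natChars n := by
        rw [pinZ, hlen]; simp
      have e2 : natChars (n / 10) = pinZ (w + 1) (n / 10) := by
        rw [pinZ, hlen10]; simp
      rw [e1, natChars_ge h10, e2, ih (n / 10) hd10]
      have ediv : n / 10 / 10 ^ w = n / 10 ^ (w + 1) := by
        rw [Nat.div_div_eq_div_mul]
        congr 1
        ring
      have emod1 : n % 10 ^ (w + 1) / 10 = n / 10 % 10 ^ w := by
        have : (10:Nat) ^ (w+1) = 10 * 10 ^ w := by ring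
        rw [this, Nat.mod_mul_right_div_self]
      have emod2 : n % 10 ^ (w + 1) % 10 = n % 10 := by
        apply Nat.mod_mod_of_dvd
        exact ⟨10 ^ w, by ring⟩
      rw [pinZ_append w hw1 (n % 10 ^ (w+1)), emod1, emod2, ediv]
      simp

theorem digitChar_lt : ∀ n < 10, ∀ m < 10, n < m → Nat.digitChar n < Nat.digitChar m := by decide

theorem pinZ_mono (w : Nat) (hw : 1 ≤ w) : ∀ n m, n < m → m < 10 ^ w →
    List.Lex (· < ·) (pinZ w n) (pinZ w m) := by
  induction w, hw using Nat.le_induction with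
  | base =>
    intro n m hnm hm
    rw [pow_one] at hm
    have e1 : pinZ 1 n = [Nat.digitChar n] := by
      rw [pinZ, natChars_lt (by omega)]; simp
    have e2 : pinZ 1 m = [Nat.digitChar m] := by
      rw [pinZ, natChars_lt hm]; simp
    rw [e1, e2]
    exact List.Lex.rel (digitChar_lt n (by omega) m hm hnm)
  | succ w hw1 ih =>
    intro n m hnm hm
    rw [pinZ_step w hw1 n (by omega), pinZ_step w hw1 m hm]
    have hdle : n / 10 ^ w ≤ m / 10 ^ w := Nat.div_le_div_right (by omega)
    rcases Nat.lt_or_ge (n / 10 ^ w) (m / 10 ^ w) with hlt | hge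
    · apply List.Lex.rel
      apply digitChar_lt
      · have : n / 10 ^ w < 10 := by
          rw [Nat.div_lt_iff_lt_mul (pow_pos (by omega : (0:Nat) < 10) _)]
          calc n < 10 ^ (w+1) := by omega
          _ = 10 * 10 ^ w := by ring
        omega
      · rw [Nat.div_lt_iff_lt_mul (pow_pos (by omega : (0:Nat) < 10) _)]
        calc m < 10 ^ (w+1) := hm
        _ = 10 * 10 ^ w := by ring
      · exact hlt
    · have heq : n / 10 ^ w = m / 10 ^ w := by omega
      rw [heq]
      apply List.Lex.cons
      apply ih
      · have h1 := Nat.div_add_mod n (10 ^ w)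
        have h2 := Nat.div_add_mod m (10 ^ w)
        rw [heq] at h1
        omega
      · exact Nat.mod_lt _ (pow_pos (by omega : (0:Nat) < 10) _)

def charsVal (L : List Char) : Nat := L.foldl (fun a c => a * 10 + (c.toNat - 48)) 0

theorem charsVal_shift (L : List Char) : ∀ a : Nat,
    L.foldl (fun a c => a * 10 + (c.toNat - 48)) a = a * 10 ^ L.length + charsVal L := by
  induction L with
  | nil => intro a; simp [charsVal]
  | cons c L ih =>
    intro a
    show L.foldl _ (a * 10 + (c.toNat - 48)) = _
    rw [ih (a * 10 + (c.toNat - 48))]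
    have : charsVal (c :: L) = (c.toNat - 48) * 10 ^ L.length + charsVal L := by
      show L.foldl _ (0 * 10 + (c.toNat - 48)) = _
      rw [ih (0 * 10 + (c.toNat - 48))]
      ring
    rw [this]
    simp [List.length_cons]
    ring

theorem digitChar_val : ∀ d < 10, (Nat.digitChar d).toNat - 48 = d := by decide

theorem charsVal_lt (L : List Char) (hd : ∀ c ∈ L, ∃ d, d < 10 ∧ c = Nat.digitChar d) :
    charsVal L < 10 ^ L.length := by
  induction L with
  | nil => simp [charsVal]
  | cons c L ih =>
    have hcv : charsVal (c :: L) = (c.toNat - 48) * 10 ^ L.length + charsVal L := by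
      show L.foldl _ (0 * 10 + (c.toNat - 48)) = _
      rw [charsVal_shift L]
      ring
    obtain ⟨d, hd10, hcd⟩ := hd c (by simp)
    have hv : c.toNat - 48 = d := by rw [hcd]; exact digitChar_val d hd10
    have hL := ih (fun c hc => hd c (List.mem_cons_of_mem _ hc))
    rw [hcv, hv]
    have : 10 ^ (c :: L).length = 10 * 10 ^ L.length := by
      simp [List.length_cons]; ring
    rw [this]
    nlinarith [hL, hd10]

theorem pinZ_charsVal (L : List Char) (hw : 1 ≤ L.length)
    (hd : ∀ c ∈ L, ∃ d, d < 10 ∧ c = Nat.digitChar d) :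
    pinZ L.length (charsVal L) = L := by
  induction L with
  | nil => simp at hw
  | cons c L ih =>
    obtain ⟨d, hd10, hcd⟩ := hd c (by simp)
    have hv : c.toNat - 48 = d := by rw [hcd]; exact digitChar_val d hd10
    have hcv : charsVal (c :: L) = d * 10 ^ L.length + charsVal L := by
      show L.foldl _ (0 * 10 + (c.toNat - 48)) = _
      rw [charsVal_shift L, hv]
      ring
    have hdL : ∀ c ∈ L, ∃ d, d < 10 ∧ c = Nat.digitChar d :=
      fun c hc => hd c (List.mem_cons_of_mem _ hc)
    have hLlt := charsVal_lt L hdL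
    rcases List.eq_nil_or_concat' L with hL | _
    · subst hL
      rw [hcv]
      simp [charsVal] at *
      rw [pinZ, natChars_lt hd10]
      simp [hcd]
    case _ h1 =>
      have hlen1 : 1 ≤ L.length := by
        rcases L with _ | _
        · obtain ⟨_, _, h⟩ := h1; simp at h
        · simp
      have hstep : pinZ (L.length + 1) (charsVal (c :: L))
          = Nat.digitChar (charsVal (c :: L) / 10 ^ L.length)
            :: pinZ L.length (charsVal (c :: L) % 10 ^ L.length) := by
        apply pinZ_step L.length hlen1
        rw [hcv]
        have : (10:Nat) ^ (L.length + 1) = 10 * 10 ^ L.length := by ring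
        rw [this]
        nlinarith [hLlt, hd10]
      have hpos : 0 < 10 ^ L.length := pow_pos (by omega : (0:Nat) < 10) _
      have hdiv : charsVal (c :: L) / 10 ^ L.length = d := by
        rw [hcv, mul_comm, Nat.mul_add_div hpos, Nat.div_eq_of_lt hLlt]
        omega
      have hmod : charsVal (c :: L) % 10 ^ L.length = charsVal L := by
        rw [hcv, mul_comm, Nat.mul_add_mod, Nat.mod_eq_of_lt hLlt]
      show pinZ (L.length + 1) (charsVal (c :: L)) = c :: L
      rw [hstep, hdiv, hmod, ih hlen1 hdL, hcd]

-- ---- strings, the candidate pin list ----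

def pinS (w k : Nat) : String := String.ofList (pinZ w k)

def candL (w : Nat) : List String := (List.range (10 ^ w)).map (pinS w)

def ascL : List Char := ['0','1','2','3','4','5','6','7','8','9']

def descL : List Char := ascL.reverse

def DSp (w : Nat) (x : String) : Prop :=
  x.toList.length = w ∧ ∀ c ∈ x.toList, ∃ d, d < 10 ∧ c = Nat.digitChar d

def repShape (w : Nat) (x : String) : Prop :=
  ∃ d, d < 10 ∧ x = String.ofList (List.replicate w (Nat.digitChar d))

def seqShape (w : Nat) (x : String) : Prop :=
  ∃ i, i + w ≤ 10 ∧
    (x = String.ofList ((ascL.drop i).take w) ∨ x = String.ofList ((descL.drop i).take w))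

theorem pin_eq (pl : Int) (k : Nat) :
    pyZfill (PySem.Int.toStr (k : Int)) pl = pinS pl.toNat k := by
  rw [pyZfill, pinS, pinZ]
  rw [PySem.Int.toList_toStr, toChars_natCast]

theorem strLt (l l' : List Char) :
    String.ofList l < String.ofList l' ↔ List.Lex (· < ·) l l' := by
  rw [String.lt_iff_toList_lt, String.toList_ofList, String.toList_ofList]
  exact List.lt_iff_lex_lt l l'

theorem cand_pairwise (w : Nat) (hw : 1 ≤ w) : (candL w).Pairwise (· < ·) := by
  rw [candL, List.pairwise_map]
  rw [List.pairwise_iff_getElem]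
  intro i j hi hj hij
  simp only [List.getElem_range] at *
  rw [pinS, pinS, strLt]
  exact pinZ_mono w hw i j (by simpa using hij) (by simpa using hj)

theorem mem_candL (w : Nat) (x : String) :
    x ∈ candL w ↔ ∃ k, k < 10 ^ w ∧ x = pinS w k := by
  rw [candL, List.mem_map]
  constructor
  · rintro ⟨k, hk, rfl⟩; exact ⟨k, by simpa using hk, rfl⟩
  · rintro ⟨k, hk, rfl⟩; exact ⟨k, by simpa using hk, rfl⟩

theorem cand_char (w : Nat) (hw : 1 ≤ w) (x : String) : x ∈ candL w ↔ DSp w x := by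
  rw [mem_candL]
  constructor
  · rintro ⟨k, hk, rfl⟩
    refine ⟨?_, ?_⟩
    · rw [pinS, String.toList_ofList]; exact length_pinZ hw hk
    · rw [pinS, String.toList_ofList]; exact pinZ_digits w k
  · rintro ⟨hlen, hd⟩
    refine ⟨charsVal x.toList, ?_, ?_⟩
    · have := charsVal_lt x.toList hd
      rwa [hlen] at this
    · have := pinZ_charsVal x.toList (by omega) hd
      rw [hlen] at this
      rw [pinS, this, String.ofList_toList]

theorem foldl_add_absorb {t : List Char} {s : PySem.Set Char} (h : ∀ a ∈ t, a ∈ s) :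
    t.foldl PySem.Set.add s = s := by
  induction t with
  | nil => rfl
  | cons a t ih =>
    have ha : PySem.Set.add s a = s := by
      rw [PySem.Set.add]
      have : PySem.Set.contains s a = true := (PySem.Set.contains_iff s a).mpr (h a (by simp))
      simp [PySem.Set.contains] at this
      simp [this]
    show t.foldl PySem.Set.add (PySem.Set.add s a) = s
    rw [ha]
    exact ih (fun b hb => h b (List.mem_cons_of_mem _ hb))

theorem ofList_singleton_iff (cs : List Char) (c : Char) :
    PySem.Set.ofList cs = [c] ↔ (cs ≠ [] ∧ ∀ a ∈ cs, a = c) := by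
  constructor
  · intro h
    refine ⟨?_, ?_⟩
    · intro hnil
      subst hnil
      simp [PySem.Set.ofList, PySem.Set.empty] at h
    · intro a ha
      have : a ∈ PySem.Set.ofList cs := (PySem.Set.mem_ofList cs a).mpr ha
      rw [h] at this; simpa using this
  · rintro ⟨hne, hall⟩
    rcases cs with _ | ⟨a, t⟩
    · simp at hne
    · have ha : a = c := hall a (by simp)
      subst ha
      show (a :: t).foldl PySem.Set.add [] = [a]
      rw [List.foldl_cons]
      have : PySem.Set.add ([] : PySem.Set Char) a = [a] := rfl
      rw [this]
      apply foldl_add_absorb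
      intro b hb
      have hba : b = a := hall b (List.mem_cons_of_mem _ hb)
      rw [hba]
      simp

theorem window_iff (cs L : List Char) (w : Nat) (hcs : cs.length = w) :
    cs <:+: L ↔ ∃ i, i + w ≤ L.length ∧ cs = (L.drop i).take w := by
  constructor
  · rintro ⟨s, t, rfl⟩
    subst hcs
    refine ⟨s.length, by simp [List.length_append], ?_⟩
    rw [List.append_assoc, List.drop_left, List.take_left]
  · rintro ⟨i, hi, rfl⟩
    exact ((List.take_prefix w (L.drop i)).isInfix).trans ((List.drop_suffix i L).isInfix)

set_option maxRecDepth 10000 in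
theorem asc_toList : "0123456789".toList = ascL := by decide

set_option maxRecDepth 10000 in
theorem desc_toList : "9876543210".toList = descL := by decide

theorem ascL_digits : ∀ c ∈ ascL, ∃ d, d < 10 ∧ c = Nat.digitChar d := by
  intro c hc
  simp [ascL] at hc
  rcases hc with rfl | rfl | rfl | rfl | rfl | rfl | rfl | rfl | rfl | rfl
  exacts [⟨0, by omega, by decide⟩, ⟨1, by omega, by decide⟩, ⟨2, by omega, by decide⟩, ⟨3, by omega, by decide⟩, ⟨4, by omega, by decide⟩, ⟨5, by omega, by decide⟩, ⟨6, by omega, by decide⟩, ⟨7, by omega, by decide⟩, ⟨8, by omega, by decide⟩, ⟨9, by omega, by decide⟩]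

theorem repShape_iff_len_one (w : Nat) (hw : 1 ≤ w) (x : String) (hx : DSp w x) :
    (PySem.Set.ofList x.toList).length = 1 ↔ repShape w x := by
  obtain ⟨hlen, hd⟩ := hx
  rw [List.length_eq_one_iff]
  constructor
  · rintro ⟨c, hc⟩
    obtain ⟨hne, hall⟩ := (ofList_singleton_iff x.toList c).mp hc
    obtain ⟨a, ha⟩ := List.exists_mem_of_ne_nil _ hne
    obtain ⟨d, hd10, hcd⟩ := hd a ha
    refine ⟨d, hd10, ?_⟩
    have hxl : x.toList = List.replicate w (Nat.digitChar d) := by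
      rw [List.eq_replicate_iff]
      exact ⟨hlen, fun b hb => by rw [hall b hb, ← hcd, hall a ha]⟩
    rw [← hxl, String.ofList_toList]
  · rintro ⟨d, hd10, rfl⟩
    refine ⟨Nat.digitChar d, (ofList_singleton_iff _ _).mpr ⟨?_, ?_⟩⟩
    · rw [String.toList_ofList]
      intro hnil
      have := congrArg List.length hnil
      simp at this
      omega
    · rw [String.toList_ofList]
      intro a ha
      exact List.eq_of_mem_replicate ha

theorem special_iff (w : Nat) (hw : 1 ≤ w) (x : String) (hx : DSp w x) :
    pinIsSpecial x = true ↔ repShape w x ∨ seqShape w x := by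
  have hlen := hx.1
  rw [pinIsSpecial]
  simp only [Bool.or_eq_true, beq_iff_eq]
  have h1 : (PySem.Set.len (PySem.Set.ofList x.toList) = 1) ↔ repShape w x := by
    rw [PySem.Set.len]
    rw [show ((((PySem.Set.ofList x.toList).length : Int)) = 1) ↔
      ((PySem.Set.ofList x.toList).length = 1) by omega]
    exact repShape_iff_len_one w hw x hx
  have h2 : (PySem.Str.isIn x "0123456789" = true) ↔
      ∃ i, i + w ≤ 10 ∧ x = String.ofList ((ascL.drop i).take w) := by
    rw [PySem.Str.isIn_iff_infix, asc_toList, window_iff x.toList ascL w hlen]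
    constructor
    · rintro ⟨i, hi, he⟩
      refine ⟨i, by simpa using hi, ?_⟩
      rw [← he, String.ofList_toList]
    · rintro ⟨i, hi, rfl⟩
      exact ⟨i, by simpa using hi, by rw [String.toList_ofList]⟩
  have h3 : (PySem.Str.isIn x "9876543210" = true) ↔
      ∃ i, i + w ≤ 10 ∧ x = String.ofList ((descL.drop i).take w) := by
    rw [PySem.Str.isIn_iff_infix, desc_toList, window_iff x.toList descL w hlen]
    have : descL.length = 10 := by decide
    rw [this]
    constructor
    · rintro ⟨i, hi, he⟩
      exact ⟨i, hi, by rw [← he, String.ofList_toList]⟩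
    · rintro ⟨i, hi, rfl⟩
      exact ⟨i, hi, by rw [String.toList_ofList]⟩
  rw [h1, h2, h3, seqShape]
  constructor
  · rintro ((h | h) | h)
    · exact Or.inl h
    · obtain ⟨i, hi, he⟩ := h
      exact Or.inr ⟨i, hi, Or.inl he⟩
    · obtain ⟨i, hi, he⟩ := h
      exact Or.inr ⟨i, hi, Or.inr he⟩
  · rintro (h | ⟨i, hi, (he | he)⟩)
    · exact Or.inl (Or.inl h)
    · exact Or.inl (Or.inr ⟨i, hi, he⟩)
    · exact Or.inr ⟨i, hi, he⟩

theorem mem_rep (pl : Int) (hpl : 1 ≤ pl) (x : String) :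
    x ∈ generate_repeating_pins pl ↔ repShape pl.toNat x := by
  rw [generate_repeating_pins, PySem.Set.mem_ofList, List.mem_map]
  constructor
  · rintro ⟨d, hd, rfl⟩
    rw [PySem.List.mem_pyRange_one] at hd
    refine ⟨d.toNat, by omega, ?_⟩
    have ht : PySem.Int.toChars d = [Nat.digitChar d.toNat] := by
      rw [show d = ((d.toNat : Nat) : Int) by omega, toChars_natCast]
      exact natChars_lt (by omega)
    rw [ht, PySem.List.pyRepeat_singleton]
  · rintro ⟨d, hd10, rfl⟩
    refine ⟨(d : Int), ?_, ?_⟩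
    · rw [PySem.List.mem_pyRange_one]; omega
    · rw [toChars_natCast, natChars_lt hd10, PySem.List.pyRepeat_singleton]

theorem mem_seq (pl : Int) (hpl : 1 ≤ pl) (x : String) :
    x ∈ generate_sequential_pins pl ↔ seqShape pl.toNat x := by
  have hw : 1 ≤ pl.toNat := by omega
  have hcast : ((pl.toNat : Nat) : Int) = pl := Int.toNat_of_nonneg (by omega)
  simp only [generate_sequential_pins]
  rw [← PySem.Set.update_map_eq_foldl_add, ← PySem.Set.update_map_eq_foldl_add,
    PySem.Set.mem_update, PySem.Set.mem_update]
  have hempty : x ∈ (PySem.Set.empty : PySem.Set String) ↔ False := by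
    simp [PySem.Set.empty]
  have hslice : ∀ (L : List Char) (i : Int), 0 ≤ i → i < 10 - pl + 1 →
      PySem.Str.slice (String.ofList L) (some i) (some (i + pl))
        = String.ofList ((L.drop i.toNat).take pl.toNat) := by
    intro L i h0 hlt
    rw [PySem.Str.slice]
    have : PySem.Chars.slice (String.ofList L).toList (some i) (some (i + pl))
        = (L.drop i.toNat).take pl.toNat := by
      rw [PySem.Chars.slice, String.toList_ofList]
      calc PySem.List.slice L (some i) (some (i + pl))
          = PySem.List.slice L (some ((i.toNat : Nat) : Int))
              (some (((i.toNat : Nat) : Int) + ((pl.toNat : Nat) : Int))) := by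
            congr 2
            · omega
            · congr 1 <;> omega
        _ = (L.drop i.toNat).take pl.toNat := PySem.List.slice_natCast_add L i.toNat pl.toNat
    rw [this]
  have hasc : "0123456789" = String.ofList ascL := by rfl
  constructor
  · rintro ((h | h) | h)
    · exact absurd h (by simpa using hempty)
    · rw [List.mem_map] at h
      obtain ⟨i, hi, rfl⟩ := h
      rw [PySem.List.mem_pyRange_one] at hi
      refine ⟨i.toNat, by omega, Or.inl ?_⟩
      rw [hasc, hslice ascL i hi.1 hi.2]
    · rw [List.mem_map] at h
      obtain ⟨i, hi, rfl⟩ := h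
      rw [PySem.List.mem_pyRange_one] at hi
      refine ⟨i.toNat, by omega, Or.inr ?_⟩
      rw [show String.ofList "0123456789".toList.reverse = String.ofList descL from rfl,
        hslice descL i hi.1 hi.2]
  · rintro ⟨i, hi, (rfl | rfl)⟩
    · refine Or.inl (Or.inr ?_)
      rw [List.mem_map]
      refine ⟨(i : Int), ?_, ?_⟩
      · rw [PySem.List.mem_pyRange_one]; omega
      · rw [hasc, hslice ascL (i : Int) (by omega) (by omega)]
        simp
    · refine Or.inr ?_
      rw [List.mem_map]
      refine ⟨(i : Int), ?_, ?_⟩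
      · rw [PySem.List.mem_pyRange_one]; omega
      · rw [show String.ofList "0123456789".toList.reverse = String.ofList descL from rfl,
          hslice descL (i : Int) (by omega) (by omega)]
        simp

theorem repShape_DS (w : Nat) (hw : 1 ≤ w) (x : String) (h : repShape w x) : DSp w x := by
  obtain ⟨d, hd10, rfl⟩ := h
  refine ⟨by simp [String.toList_ofList], ?_⟩
  rw [String.toList_ofList]
  intro c hc
  exact ⟨d, hd10, List.eq_of_mem_replicate hc⟩

theorem seqShape_DS (w : Nat) (x : String) (h : seqShape w x) : DSp w x := by
  obtain ⟨i, hi, (rfl | rfl)⟩ := h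
  · refine ⟨?_, ?_⟩
    · rw [String.toList_ofList, List.length_take, List.length_drop]
      have : ascL.length = 10 := rfl
      omega
    · rw [String.toList_ofList]
      intro c hc
      exact ascL_digits c (List.mem_of_mem_drop (List.mem_of_mem_take hc))
  · refine ⟨?_, ?_⟩
    · rw [String.toList_ofList, List.length_take, List.length_drop]
      have : descL.length = 10 := rfl
      omega
    · rw [String.toList_ofList]
      intro c hc
      have : c ∈ descL := List.mem_of_mem_drop (List.mem_of_mem_take hc)
      rw [descL, List.mem_reverse] at this
      exact ascL_digits c this

theorem loop_classify (exS : PySem.Set String) (g : Int → String) (xs : List Int) (acc : List String × List String) :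
    xs.foldl (fun acc i =>
        if PySem.Set.contains exS (g i) then acc
        else if pinIsSpecial (g i) then (acc.1 ++ [g i], acc.2)
        else (acc.1, acc.2 ++ [g i])) acc
      = (acc.1 ++ (xs.map g).filter (fun p => !PySem.Set.contains exS p && pinIsSpecial p),
         acc.2 ++ (xs.map g).filter (fun p => !PySem.Set.contains exS p && !pinIsSpecial p)) := by
  induction xs generalizing acc with
  | nil => simp
  | cons p xs ih =>
    rw [List.foldl_cons, ih]
    by_cases hex : g p ∈ exS
    · simp [hex, List.filter_cons]
    · by_cases hsp : pinIsSpecial (g p)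
      · simp [hex, hsp, List.filter_cons]
      · simp [hex, hsp, List.filter_cons]

theorem sorted_half (xs ys : List String) (hn : xs.Nodup) (hpw : ys.Pairwise (· < ·))
    (hmem : ∀ a, a ∈ ys ↔ a ∈ xs) :
    PySem.List.sorted xs (fun x => x) = ys := by
  apply PySem.List.sorted_eq_of_perm_of_pairwise_lt
  · exact (List.perm_ext_iff_of_nodup (hpw.imp ne_of_lt) hn).mpr hmem
  · exact hpw

-- ===== VERDICT (by name: the statement is the Claim_ definition above) =====
theorem generate_all_pins_spec : Claim_equal_generate_all_pins := by
  intro pl d2 d1 ph hdom hpre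
  unfold Pre_generate_all_pins at hpre
  unfold Spec_generate_all_pins
  have hw : 1 ≤ pl.toNat := by omega
  have hcand : (PySem.List.pyRange 0 ((10:Int) ^ pl.toNat)).map
      (fun i => pyZfill (PySem.Int.toStr i) pl) = candL pl.toNat := by
    have hlimit : ((10:Int) ^ pl.toNat) = (((10 ^ pl.toNat : Nat)) : Int) := by push_cast; ring
    rw [hlimit, PySem.List.pyRange_zero_natCast, List.map_map, candL]
    simp only [Function.comp_def, pin_eq]
  simp only [generate_all_pins, generate_all_pins_alt]
  rw [loop_classify, hcand]
  dsimp only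
  rw [show ∀ l : List String, [] ++ l = l from fun l => rfl,
    show ∀ l : List String, [] ++ l = l from fun l => rfl]
  set dateS : PySem.Set String :=
    PySem.Set.union (PySem.Set.ofList (PySem.Dict.keys ⟨d2⟩))
      (PySem.Set.ofList (PySem.Dict.keys ⟨d1⟩)) with hdateS
  set phS : PySem.Set String := PySem.Set.ofList ph with hphS
  set exS : PySem.Set String := PySem.Set.union dateS phS with hexS
  set repS := generate_repeating_pins pl with hrepS
  set seqS := generate_sequential_pins pl with hseqS
  have hrepN : repS.Nodup := by rw [hrepS, generate_repeating_pins]; exact PySem.Set.nodup_ofList _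
  have hex_iff : ∀ a : String, a ∈ exS ↔ a ∈ dateS ∨ a ∈ phS := by
    intro a; rw [hexS]; exact PySem.Set.mem_union dateS phS a
  have hBmem : ∀ (b : Bool) (a : String),
      (a ∈ (candL pl.toNat).filter (fun p => !PySem.Set.contains exS p && (pinIsSpecial p == b)))
        ↔ (a ∈ candL pl.toNat ∧ ¬ (a ∈ dateS ∨ a ∈ phS) ∧ pinIsSpecial a = b) := by
    intro b a
    rw [List.mem_filter]
    simp only [Bool.and_eq_true, Bool.not_eq_true', beq_iff_eq]
    constructor
    · rintro ⟨h1, h2, h3⟩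
      refine ⟨h1, ?_, h3⟩
      intro hmem
      have : PySem.Set.contains exS a = true := (PySem.Set.contains_iff exS a).mpr ((hex_iff a).mpr hmem)
      rw [this] at h2; exact absurd h2 (by simp)
    · rintro ⟨h1, h2, h3⟩
      refine ⟨h1, ?_, h3⟩
      by_cases hc : PySem.Set.contains exS a = true
      · exact absurd ((hex_iff a).mp ((PySem.Set.contains_iff exS a).mp hc)) h2
      · simpa using hc
  have hshape : ∀ a ∈ candL pl.toNat,
      (pinIsSpecial a = true ↔ (a ∈ repS ∨ a ∈ seqS)) := by
    intro a ha
    rw [special_iff pl.toNat hw a ((cand_char pl.toNat hw a).mp ha),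
      hrepS, hseqS, mem_rep pl hpre a, mem_seq pl hpre a]
  have hshape' : ∀ a : String, (a ∈ repS ∨ a ∈ seqS) → a ∈ candL pl.toNat := by
    intro a h
    apply (cand_char pl.toNat hw a).mpr
    rcases h with h | h
    · exact repShape_DS pl.toNat hw a ((mem_rep pl hpre a).mp (hrepS ▸ h))
    · exact seqShape_DS pl.toNat a ((mem_seq pl hpre a).mp (hseqS ▸ h))
  rw [Prod.mk.injEq]
  constructor
  · apply sorted_half
    · exact ((PySem.Set.nodup_union repS seqS hrepN).filter _).filter _
    · exact (cand_pairwise pl.toNat hw).sublist List.filter_sublist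
    · intro a
      rw [show (fun p => !PySem.Set.contains exS p && pinIsSpecial p)
          = (fun p => !PySem.Set.contains exS p && (pinIsSpecial p == true)) by
        funext p; simp]
      rw [hBmem true a]
      simp only [PySem.Set.mem_diff, PySem.Set.mem_union]
      constructor
      · rintro ⟨ha, hnd, hsp⟩
        exact ⟨⟨(hshape a ha).mp hsp, fun h => hnd (Or.inl h)⟩, fun h => hnd (Or.inr h)⟩
      · rintro ⟨⟨hm, hd'⟩, hp'⟩
        have ha := hshape' a hm
        refine ⟨ha, ?_, (hshape a ha).mpr hm⟩
        rintro (h | h)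
        · exact hd' h
        · exact hp' h
  · apply sorted_half
    · exact ((PySem.Set.nodup_ofList _).filter _).filter _
    · exact (cand_pairwise pl.toNat hw).sublist List.filter_sublist
    · intro a
      rw [show (fun p => !PySem.Set.contains exS p && !pinIsSpecial p)
          = (fun p => !PySem.Set.contains exS p && (pinIsSpecial p == false)) by
        funext p; simp [Bool.not_eq_true']]
      rw [hBmem false a]
      simp only [PySem.Set.mem_diff, PySem.List.mem_sorted, PySem.Set.mem_ofList]
      constructor
      · rintro ⟨ha, hnex, hsf⟩
        have hns : ¬ (a ∈ repS ∨ a ∈ seqS) := by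
          intro h
          rw [(hshape a ha).mpr h] at hsf
          cases hsf
        exact ⟨⟨⟨⟨ha, fun h => hnex (Or.inl h)⟩, fun h => hnex (Or.inr h)⟩,
          fun h => hns (Or.inl h)⟩, fun h => hns (Or.inr h)⟩
      · rintro ⟨⟨⟨⟨ha, hd'⟩, hp'⟩, hr'⟩, hq'⟩
        refine ⟨ha, ?_, ?_⟩
        · rintro (h | h)
          · exact hd' h
          · exact hp' h
        · cases hsp : pinIsSpecial a
          · rfl
          · refine absurd ((hshape a ha).mp hsp) ?_
            rintro (h | h)
            · exact hr' h
            · exact hq' h
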